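-- pv_equiv track=rewrite | github.com/sdhanchander/Python_Assignments | Level_II/Q10.py | calculate_stones
-- ===== SOURCE A (Python) =====
-- def calculate_stones(n):
--     stones = []
--     next_stone = 2
--     while n > 0:
--         if n >= next_stone:
--             stones.append(next_stone)
--             n -= next_stone
--             next_stone += 2
--         else:
--             break
--     return stones
-- ===== SOURCE B (Python) =====
-- import math
--
-- def calculate_stones(n):
--     if n <= 0:
--         return []
--     k = (math.isqrt(4 * n + 1) - 1) // 2  # largest k with k*(k+1) <= n
--     return [2 * i for i in range(1, k + 1)]
-- ===== Notes on version B (the rewrite author's own statement) =====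
-- stated objective: faster
-- what changed: Replaces the greedy subtract-and-append loop by a closed form: the stone count k is the largest k with k*(k+1) <= n, computed via math.isqrt, then the list is built directly as [2,4,...,2k].
import Mathlib
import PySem

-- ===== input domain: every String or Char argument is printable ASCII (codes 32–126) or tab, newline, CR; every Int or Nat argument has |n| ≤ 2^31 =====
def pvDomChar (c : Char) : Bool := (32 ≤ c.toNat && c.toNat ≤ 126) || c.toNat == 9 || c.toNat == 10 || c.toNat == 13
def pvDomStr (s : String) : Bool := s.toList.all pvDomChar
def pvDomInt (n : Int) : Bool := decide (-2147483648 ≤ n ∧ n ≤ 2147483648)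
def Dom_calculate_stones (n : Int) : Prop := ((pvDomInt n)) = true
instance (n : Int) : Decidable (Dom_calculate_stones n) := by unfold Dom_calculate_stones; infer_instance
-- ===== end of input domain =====

-- B computes the stone count k (largest k with k*(k+1) ≤ n) in closed form via isqrt
-- instead of A's greedy subtract-and-append loop; same return value on all inputs.

-- ===== PORT A =====
-- while n > 0: if n >= next_stone: append, subtract, +2 else break.
-- Fuel-based transcription of the while loop; fuel n.toNat + 1 is enough since each
-- iteration removes next_stone ≥ 2 from n and the loop stops once n ≤ 0.
def pvALoop : Nat → Int → Int → List Int → List Int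
  | 0, _, _, stones => stones
  | fuel + 1, n, next_stone, stones =>
    if n > 0 then
      if n ≥ next_stone then
        pvALoop fuel (n - next_stone) (next_stone + 2) (stones ++ [next_stone])
      else stones
    else stones

def calculate_stones (n : Int) : List Int :=
  pvALoop (n.toNat + 1) n 2 []

-- ===== PORT B =====
def calculate_stones_alt (n : Int) : List Int :=
  if n ≤ 0 then []
  else
    let k := PySem.Int.floordiv (Int.sqrt (4 * n + 1) - 1) 2
    (PySem.List.pyRange 1 (k + 1) 1).map (fun i => 2 * i)

-- ===== PRECONDITION & SPEC =====
def Spec_calculate_stones (n : Int) (out : List Int) : Prop := out = calculate_stones_alt n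
instance (n : Int) (out : List Int) : Decidable (Spec_calculate_stones n out) := by unfold Spec_calculate_stones; infer_instance

-- ===== CLAIM (what is proved, stated in full; the proofs are below) =====
def Claim_equal_calculate_stones : Prop := ∀ (n : Int), Dom_calculate_stones n → Spec_calculate_stones n (calculate_stones n)

-- ===== LEMMAS AND PROOFS =====

-- Loop invariant: started with m = N - j*(j+1) and next_stone = 2*j+2, where
-- K := j + t is the largest k with k*(k+1) ≤ N, the loop appends 2*(j+1), …, 2*K.
lemma pvALoop_spec (t : Nat) : ∀ (fuel : Nat) (j m : Int) (acc : List Int),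
    t ≤ fuel → 0 ≤ j →
    (j + t) * (j + t + 1) ≤ m + j * (j + 1) →
    m + j * (j + 1) < (j + t + 1) * (j + t + 2) →
    pvALoop fuel m (2 * j + 2) acc
      = acc ++ (PySem.List.pyRange (j + 1) (j + t + 1) 1).map (fun i => 2 * i) := by
  induction t with
  | zero =>
    intro fuel j m acc _ hj hlo hhi
    have hm : m < 2 * j + 2 := by push_cast at hlo hhi ⊢; nlinarith
    rw [PySem.List.pyRange_one_eq_nil (by push_cast; omega)]
    cases fuel with
    | zero => simp [pvALoop]
    | succ f =>
      simp only [pvALoop]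
      split_ifs with h1 h2
      · omega
      · simp
      · simp
  | succ t ih =>
    intro fuel j m acc hfuel hj hlo hhi
    have hstep : 2 * j + 2 ≤ m := by push_cast at hlo; nlinarith
    have hmpos : 0 < m := by omega
    cases fuel with
    | zero => omega
    | succ f =>
      simp only [pvALoop]
      rw [if_pos hmpos, if_pos hstep]
      have h24 : (2 : Int) * j + 2 + 2 = 2 * (j + 1) + 2 := by ring
      rw [h24]
      have := ih f (j + 1) (m - (2 * j + 2)) (acc ++ [2 * j + 2])
        (by omega) (by omega)
        (by push_cast at hlo ⊢; nlinarith)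
        (by push_cast at hhi ⊢; nlinarith)
      rw [this]
      rw [PySem.List.pyRange_one_cons (a := j + 1) (by push_cast; omega)]
      simp only [List.map_cons, List.append_assoc, List.cons_append, List.nil_append]
      norm_num
      constructor
      · ring
      · congr 2
        ring

-- Bounds for the closed-form count: for n ≥ 1, k = ((isqrt (4n+1)) - 1) // 2 is the
-- largest k with k*(k+1) ≤ n.
lemma pvK_bounds (n : Int) (hn : 1 ≤ n) :
    0 ≤ PySem.Int.floordiv (Int.sqrt (4 * n + 1) - 1) 2 ∧
    (PySem.Int.floordiv (Int.sqrt (4 * n + 1) - 1) 2) *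
      (PySem.Int.floordiv (Int.sqrt (4 * n + 1) - 1) 2 + 1) ≤ n ∧
    n < (PySem.Int.floordiv (Int.sqrt (4 * n + 1) - 1) 2 + 1) *
      (PySem.Int.floordiv (Int.sqrt (4 * n + 1) - 1) 2 + 2) := by
  set s : Int := 4 * n + 1 with hs
  have hs0 : 0 ≤ s := by omega
  set r : Int := Int.sqrt s with hr
  have hr0 : 0 ≤ r := Int.sqrt_nonneg s
  have hrle : r * r ≤ s := by
    have h := Nat.sqrt_le' s.toNat
    rw [pow_two] at h
    have : ((Nat.sqrt s.toNat : Int)) * (Nat.sqrt s.toNat : Int) ≤ (s.toNat : Int) := by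
      exact_mod_cast h
    simpa [hr, Int.sqrt, Int.toNat_of_nonneg hs0] using this
  have hrlt : s < (r + 1) * (r + 1) := by
    have h := Nat.lt_succ_sqrt' s.toNat
    rw [Nat.succ_eq_add_one, pow_two] at h
    have : ((s.toNat : Int)) < ((Nat.sqrt s.toNat : Int) + 1) * ((Nat.sqrt s.toNat : Int) + 1) := by
      exact_mod_cast h
    simpa [hr, Int.sqrt, Int.toNat_of_nonneg hs0] using this
  have hr1 : 1 ≤ r := by nlinarith
  rw [PySem.Int.floordiv_eq_ediv_of_pos (by norm_num)]
  set k : Int := (r - 1) / 2 with hk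
  have hk2 : 2 * k ≤ r - 1 ∧ r - 1 ≤ 2 * k + 1 := by omega
  have hk0 : 0 ≤ k := by omega
  refine ⟨hk0, ?_, ?_⟩
  · nlinarith [hk2.1]
  · nlinarith [hk2.2]

theorem calculate_stones_spec : Claim_equal_calculate_stones := by
  intro n _
  unfold Spec_calculate_stones calculate_stones calculate_stones_alt
  by_cases hn : n ≤ 0
  · rw [if_pos hn]
    have : n.toNat = 0 := by omega
    simp [this, pvALoop, hn]
  · rw [if_neg hn]
    push Not at hn
    obtain ⟨hk0, hlo, hhi⟩ := pvK_bounds n (by omega)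
    set k : Int := PySem.Int.floordiv (Int.sqrt (4 * n + 1) - 1) 2 with hkdef
    have hkn : k ≤ n := by nlinarith
    have hkt : (k.toNat : Int) = k := Int.toNat_of_nonneg hk0
    have h20 : (2 : Int) * 0 + 2 = 2 := by norm_num
    have := pvALoop_spec k.toNat (n.toNat + 1) 0 n []
      (by omega) le_rfl
      (by rw [hkt]; simpa using hlo)
      (by rw [hkt]; simpa using hhi)
    rw [← h20, this]
    simp [hkt]
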